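-- pv_equiv track=rewrite | github.com/yoonchulroh/advent-of-code-2025-fpga | reference_solutions/reference_solution_no_optimization.py | patterns
-- ===== SOURCE A (Python) =====
-- from itertools import combinations, product
--
-- def patterns(coeffs: list[tuple[int, ...]]) -> dict[tuple[int, ...], int]:
-- 	out = {}
-- 	num_buttons = len(coeffs)
-- 	num_variables = len(coeffs[0])
-- 	for pattern_len in range(num_buttons+1):
-- 		for buttons in combinations(range(num_buttons), pattern_len):
-- 			pattern = tuple(map(sum, zip((0,) * num_variables, *(coeffs[i] for i in buttons))))
-- 			if pattern not in out:
-- 				out[pattern] = pattern_len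
-- 	return out
-- ===== SOURCE B (Python) =====
-- def patterns(coeffs):
--     num_buttons = len(coeffs)
--     num_variables = len(coeffs[0])
--     zero = (0,) * num_variables
--     out = {zero: 0}
--     # breadth-first over subset sizes: each frontier entry carries its running
--     # coefficient-sum vector and the last button index used, so each subset costs
--     # one vector addition instead of re-summing all of its rows from scratch.
--     frontier = [(zero, -1)]
--     for k in range(1, num_buttons + 1):
--         new_frontier = []
--         for s, last in frontier:
--             for j in range(last + 1, num_buttons):
--                 new_frontier.append((tuple(x + y for x, y in zip(s, coeffs[j])), j))
--         for t, _ in new_frontier: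
--             if t not in out:
--                 out[t] = k
--         frontier = new_frontier
--     return out
-- ===== Notes on version B (the rewrite author's own statement) =====
-- stated objective: alternative
-- what changed: A enumerates every index subset with itertools.combinations and re-sums all of its coefficient rows from scratch via a variadic zip; B runs a breadth-first frontier over subset sizes that carries each subset's running sum vector and last index, so each new subset costs one vector addition.
import Mathlib
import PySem

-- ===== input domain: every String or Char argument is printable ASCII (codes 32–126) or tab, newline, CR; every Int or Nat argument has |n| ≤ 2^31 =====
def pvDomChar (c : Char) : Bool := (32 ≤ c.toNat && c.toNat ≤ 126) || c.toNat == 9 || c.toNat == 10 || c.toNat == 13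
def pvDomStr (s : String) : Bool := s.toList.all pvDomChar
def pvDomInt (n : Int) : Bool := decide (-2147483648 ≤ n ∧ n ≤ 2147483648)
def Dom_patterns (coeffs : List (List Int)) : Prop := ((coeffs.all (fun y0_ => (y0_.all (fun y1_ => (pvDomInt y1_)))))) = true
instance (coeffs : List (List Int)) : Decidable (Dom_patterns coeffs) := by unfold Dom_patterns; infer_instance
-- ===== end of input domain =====

-- B replaces A's re-summing of every subset (via itertools.combinations) by a breadth-first
-- frontier that extends each subset's running sum vector by one row at a time (objective: alternative).

-- ===== PORT A =====
-- hand port of Python's variadic zip(z, *rows) as the list of columns (truncates to the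
-- shortest sequence, exactly as zip does); the sum over each column is taken afterwards
def pyZipCols : List Int → List (List Int) → List (List Int)
  | [], _ => []
  | a :: as, rest =>
    if rest.all (fun r => !r.isEmpty) then
      (a :: rest.map (fun r => r.headD 0)) :: pyZipCols as (rest.map (fun r => r.tail))
    else []

def patterns (coeffs : List (List Int)) : List (List Int × Int) :=
  let numButtons := coeffs.length
  let numVariables := (coeffs.headD []).length   -- len(coeffs[0]); Pre_ excludes coeffs = [] (IndexError)
  (List.range (numButtons + 1)).foldl (fun out patternLen =>
    (PySem.List.combinations (PySem.List.pyRange 0 (numButtons : Int) 1) patternLen).foldl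
      (fun out buttons =>
        let rows := buttons.map (fun i => (PySem.List.pyGet? coeffs i).getD [])  -- index always in range
        let pattern := (pyZipCols (List.replicate numVariables 0) rows).map (fun col => col.sum)
        if out.any (fun p => p.1 == pattern) then out else out ++ [(pattern, (patternLen : Int))])
      out) []

-- ===== PORT B =====
def patterns_alt (coeffs : List (List Int)) : List (List Int × Int) :=
  let numButtons := coeffs.length
  let numVariables := (coeffs.headD []).length   -- len(coeffs[0]); Pre_ excludes coeffs = [] (IndexError)
  let zero : List Int := List.replicate numVariables 0
  let final := (List.range numButtons).foldl
    (fun (st : List (List Int × Int) × List (List Int × Int)) (kk : Nat) =>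
      let newFrontier := st.2.flatMap (fun p =>
        (PySem.List.pyRange (p.2 + 1) (numButtons : Int) 1).map (fun j =>
          ((List.zip p.1 ((PySem.List.pyGet? coeffs j).getD [])).map (fun q => q.1 + q.2), j)))
      let out := newFrontier.foldl
        (fun o q => if o.any (fun p => p.1 == q.1) then o else o ++ [(q.1, ((kk : Int) + 1))]) st.1
      (out, newFrontier))
    ([(zero, 0)], [(zero, -1)])
  final.1

-- ===== PRECONDITION & SPEC =====
-- Pre_ excludes only the empty list, on which the Python A raises IndexError (len(coeffs[0])).
def Pre_patterns (coeffs : List (List Int)) : Prop := coeffs ≠ []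
instance (coeffs : List (List Int)) : Decidable (Pre_patterns coeffs) := by unfold Pre_patterns; infer_instance

def pvWitness_patterns : List (List Int) := [[1, 2], [3, 4]]

def Spec_patterns (coeffs : List (List Int)) (out : List (List Int × Int)) : Prop := out = patterns_alt coeffs
instance (coeffs : List (List Int)) (out : List (List Int × Int)) : Decidable (Spec_patterns coeffs out) := by unfold Spec_patterns; infer_instance

-- ===== CLAIM (what is proved, stated in full; the proofs are below) =====
def Claim_equal_patterns : Prop := ∀ (coeffs : List (List Int)), Dom_patterns coeffs → Pre_patterns coeffs → Spec_patterns coeffs (patterns coeffs)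

-- ===== LEMMAS AND PROOFS =====

-- proof-side vocabulary: subsets in combinations' lexicographic order, each paired with the
-- suffix of still-available indices, and the one-step extension producing the next level
def tailsW : List Int → List (Int × List Int)
  | [] => []
  | x :: xs => (x, xs) :: tailsW xs

def combosP : List Int → Nat → List (List Int × List Int)
  | l, 0 => [([], l)]
  | [], _+1 => []
  | x :: xs, k+1 => (combosP xs k).map (fun p => (x :: p.1, p.2)) ++ combosP xs (k+1)

def extP (p : List Int × List Int) : List (List Int × List Int) :=
  (tailsW p.2).map (fun q => (p.1 ++ [q.1], q.2))

-- abbreviations for the common values of both programs (for a fixed coeffs)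
def pvRow (coeffs : List (List Int)) (i : Int) : List Int := (PySem.List.pyGet? coeffs i).getD []

def pvAdd (s r : List Int) : List Int := (List.zip s r).map (fun q => q.1 + q.2)

def pvZero (coeffs : List (List Int)) : List Int := List.replicate (coeffs.headD []).length 0

def pvPat (coeffs : List (List Int)) (c : List Int) : List Int :=
  c.foldl (fun s i => pvAdd s (pvRow coeffs i)) (pvZero coeffs)

def pvIns (o : List (List Int × Int)) (key : List Int) (val : Int) : List (List Int × Int) :=
  if o.any (fun p => p.1 == key) then o else o ++ [(key, val)]

def pvG (coeffs : List (List Int)) (p : List Int × List Int) : List Int × Int :=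
  (pvPat coeffs p.1, (coeffs.length : Int) - p.2.length - 1)

def pvStep (coeffs : List (List Int)) (o : List (List Int × Int)) (k : Nat) : List (List Int × Int) :=
  (PySem.List.combinations (PySem.List.pyRange 0 (coeffs.length : Int) 1) k).foldl
    (fun o c => pvIns o (pvPat coeffs c) (k : Int)) o

theorem combosP_fst (l : List Int) (k : Nat) :
    (combosP l k).map Prod.fst = PySem.List.combinations l k := by
  induction l generalizing k with
  | nil => cases k <;> simp [combosP, PySem.List.combinations_zero, PySem.List.combinations_nil_succ]
  | cons x xs ih =>
    cases k with
    | zero => simp [combosP, PySem.List.combinations_zero]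
    | succ k =>
      simp [combosP, PySem.List.combinations_cons_succ, ← ih, List.map_map]

theorem extP_cons (x : Int) (c r : List Int) :
    extP (x :: c, r) = (extP (c, r)).map (fun p => (x :: p.1, p.2)) := by
  simp [extP, List.map_map]

theorem combosP_one (l : List Int) : combosP l 1 = extP ([], l) := by
  induction l with
  | nil => simp [combosP, extP, tailsW]
  | cons x xs ih => simp [combosP, extP, tailsW, ih]

theorem combosP_succ (l : List Int) (k : Nat) :
    combosP l (k + 1) = (combosP l k).flatMap extP := by
  induction l generalizing k with
  | nil =>
    cases k with
    | zero => simp [combosP, extP, tailsW]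
    | succ k => simp [combosP]
  | cons x xs ih =>
    cases k with
    | zero =>
      simp only [combosP, List.flatMap_cons, List.flatMap_nil, List.append_nil]
      simp [combosP_one, extP, tailsW]
    | succ k =>
      simp only [combosP, List.flatMap_append]
      have h1 : List.flatMap extP ((combosP xs k).map (fun p => (x :: p.1, p.2)))
          = (combosP xs (k+1)).map (fun p => (x :: p.1, p.2)) := by
        rw [List.flatMap_map]
        calc (combosP xs k).flatMap (fun p => extP (x :: p.1, p.2))
            = (combosP xs k).flatMap (fun p => (extP p).map (fun q => (x :: q.1, q.2))) := by
              simp only [extP_cons]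
          _ = ((combosP xs k).flatMap extP).map (fun q => (x :: q.1, q.2)) := (List.map_flatMap).symm
          _ = (combosP xs (k+1)).map (fun q => (x :: q.1, q.2)) := by rw [← ih k]
      rw [h1, ← ih (k+1)]

theorem tailsW_pyRange_aux (n : Int) : ∀ (m : Nat) (a : Int), (n - a).toNat = m →
    tailsW (PySem.List.pyRange a n 1) =
      (PySem.List.pyRange a n 1).map (fun v => (v, PySem.List.pyRange (v + 1) n 1)) := by
  intro m
  induction m with
  | zero =>
    intro a h
    have hna : ¬ a < n := by omega
    have : PySem.List.pyRange a n 1 = [] := by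
      rw [PySem.List.pyRange_one]; simp [h]
    simp [this, tailsW]
  | succ m ih =>
    intro a h
    have hlt : a < n := by omega
    rw [PySem.List.pyRange_one_cons hlt]
    simp only [tailsW, List.map_cons]
    rw [ih (a + 1) (by omega)]

theorem tailsW_pyRange (n a : Int) :
    tailsW (PySem.List.pyRange a n 1) =
      (PySem.List.pyRange a n 1).map (fun v => (v, PySem.List.pyRange (v + 1) n 1)) :=
  tailsW_pyRange_aux n (n - a).toNat a rfl

theorem combosP_rest (n : Nat) (k : Nat) :
    ∀ p ∈ combosP (PySem.List.pyRange 0 (n : Int) 1) k,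
      ∃ a : Int, 0 ≤ a ∧ a ≤ (n : Int) ∧ p.2 = PySem.List.pyRange a (n : Int) 1 := by
  induction k with
  | zero =>
    intro p hp
    simp [combosP] at hp
    subst hp
    exact ⟨0, by omega, by omega, rfl⟩
  | succ k ih =>
    rw [combosP_succ]
    intro p hp
    rw [List.mem_flatMap] at hp
    obtain ⟨q, hq, hpq⟩ := hp
    obtain ⟨a, ha0, han, h2⟩ := ih q hq
    unfold extP at hpq
    rw [h2, tailsW_pyRange] at hpq
    simp only [List.map_map, List.mem_map, Function.comp] at hpq
    obtain ⟨v, hv, rfl⟩ := hpq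
    rw [PySem.List.mem_pyRange_one] at hv
    exact ⟨v + 1, by omega, by omega, rfl⟩

theorem zipsum_nil (z : List Int) : (pyZipCols z []).map List.sum = z := by
  induction z with
  | nil => simp [pyZipCols]
  | cons a as ih => simp [pyZipCols, ih]

theorem zipsum_cons (z : List Int) : ∀ (r : List Int) (rs : List (List Int)),
    (pyZipCols z (r :: rs)).map List.sum = (pyZipCols (pvAdd z r) rs).map List.sum := by
  induction z with
  | nil => intro r rs; simp [pyZipCols, pvAdd]
  | cons a as ih =>
    intro r rs
    cases r with
    | nil => simp [pyZipCols, pvAdd]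
    | cons b bs =>
      cases hrs : rs.all (fun r => !r.isEmpty) with
      | false => simp [pyZipCols, pvAdd, List.zip_cons_cons, hrs]
      | true =>
        simp only [pyZipCols, pvAdd, List.zip_cons_cons, List.map_cons, List.all_cons,
          List.isEmpty_cons, Bool.not_false, Bool.true_and, hrs, if_true, List.sum_cons,
          List.headD_cons, List.tail_cons, List.cons.injEq]
        refine ⟨by omega, ?_⟩
        have h3 := ih bs (rs.map (fun r => r.tail))
        simpa [pvAdd] using h3

theorem zipsum (rows : List (List Int)) : ∀ z : List Int,
    (pyZipCols z rows).map List.sum = rows.foldl pvAdd z := by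
  induction rows with
  | nil => intro z; simpa using zipsum_nil z
  | cons r rs ih =>
    intro z
    rw [List.foldl_cons, ← ih (pvAdd z r), zipsum_cons]

theorem pvPat_append (coeffs : List (List Int)) (c : List Int) (j : Int) :
    pvPat coeffs (c ++ [j]) = pvAdd (pvPat coeffs c) (pvRow coeffs j) := by
  simp [pvPat, List.foldl_append]

-- one frontier step of B produces exactly the next level of subsets, in combinations' order
theorem frontier_step (coeffs : List (List Int)) (k : Nat) :
    ((combosP (PySem.List.pyRange 0 (coeffs.length : Int) 1) k).map (pvG coeffs)).flatMap
        (fun p => (PySem.List.pyRange (p.2 + 1) (coeffs.length : Int) 1).map (fun j =>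
          ((List.zip p.1 ((PySem.List.pyGet? coeffs j).getD [])).map (fun q => q.1 + q.2), j)))
      = (combosP (PySem.List.pyRange 0 (coeffs.length : Int) 1) (k + 1)).map (pvG coeffs) := by
  rw [List.flatMap_map, combosP_succ, List.map_flatMap]
  rw [List.flatMap_def, List.flatMap_def]
  congr 1
  apply List.map_congr_left
  intro p hp
  obtain ⟨c, r⟩ := p
  obtain ⟨a, ha0, han, hr⟩ := combosP_rest coeffs.length k (c, r) hp
  simp only at hr
  subst hr
  simp only [pvG, extP, tailsW_pyRange, List.map_map]
  have hstart : (coeffs.length : Int) - ((PySem.List.pyRange a (coeffs.length : Int) 1).length : Int) - 1 + 1 = a := by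
    rw [PySem.List.length_pyRange_one]; omega
  rw [hstart]
  apply List.map_congr_left
  intro v hv
  rw [PySem.List.mem_pyRange_one] at hv
  simp only [Function.comp, pvG, pvPat_append, PySem.List.length_pyRange_one, Prod.mk.injEq]
  refine ⟨rfl, by omega⟩

-- B's whole loop: the accumulated dict equals A's level-by-level construction, and the
-- frontier is level m of combosP, mapped to (running sum, last index)
theorem B_loop (coeffs : List (List Int)) : ∀ (m : Nat),
    (List.range m).foldl
      (fun (st : List (List Int × Int) × List (List Int × Int)) (kk : Nat) =>
        let newFrontier := st.2.flatMap (fun p =>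
          (PySem.List.pyRange (p.2 + 1) (coeffs.length : Int) 1).map (fun j =>
            ((List.zip p.1 ((PySem.List.pyGet? coeffs j).getD [])).map (fun q => q.1 + q.2), j)))
        let out := newFrontier.foldl
          (fun o q => if o.any (fun p => p.1 == q.1) then o else o ++ [(q.1, ((kk : Int) + 1))]) st.1
        (out, newFrontier))
      ([(List.replicate (coeffs.headD []).length 0, 0)], [(List.replicate (coeffs.headD []).length 0, -1)])
    = ((List.range (m + 1)).foldl (pvStep coeffs) [],
       (combosP (PySem.List.pyRange 0 (coeffs.length : Int) 1) m).map (pvG coeffs)) := by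
  intro m
  induction m with
  | zero =>
    simp only [List.range_zero, List.foldl_nil]
    have h1 : pvStep coeffs [] 0 = [(List.replicate (coeffs.headD []).length 0, 0)] := by
      simp [pvStep, PySem.List.combinations_zero, pvIns, pvPat, pvZero]
    have h2 : (combosP (PySem.List.pyRange 0 (coeffs.length : Int) 1) 0).map (pvG coeffs)
        = [(List.replicate (coeffs.headD []).length 0, -1)] := by
      simp [combosP, pvG, pvPat, pvZero]
    rw [h2]
    simp only [List.range_succ, List.range_zero, List.nil_append, List.foldl_cons, List.foldl_nil, h1]
  | succ m ih =>
    rw [List.range_succ, List.foldl_append, ih, List.foldl_cons, List.foldl_nil]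
    simp only
    rw [frontier_step coeffs m]
    have hout : ((combosP (PySem.List.pyRange 0 (coeffs.length : Int) 1) (m + 1)).map (pvG coeffs)).foldl
          (fun o q => if o.any (fun p => p.1 == q.1) then o else o ++ [(q.1, ((m : Int) + 1))])
          ((List.range (m + 1)).foldl (pvStep coeffs) [])
        = (List.range (m + 1 + 1)).foldl (pvStep coeffs) [] := by
      rw [List.range_succ (n := m + 1), List.foldl_append, List.foldl_cons, List.foldl_nil]
      rw [List.foldl_map]
      unfold pvStep
      rw [← combosP_fst, List.foldl_map]
      apply PySem.List.foldl_congr_mem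
      intro acc p _
      have hc : ((m : Int) + 1) = ((m + 1 : Nat) : Int) := by omega
      simp only [pvG, pvIns, hc]
    rw [hout]

theorem A_eq_steps (coeffs : List (List Int)) :
    patterns coeffs = (List.range (coeffs.length + 1)).foldl (pvStep coeffs) [] := by
  simp only [patterns]
  apply PySem.List.foldl_congr_mem
  intro acc k _
  unfold pvStep
  apply PySem.List.foldl_congr_mem
  intro acc2 c _
  have hz := zipsum (c.map (fun i => (PySem.List.pyGet? coeffs i).getD []))
      (List.replicate (coeffs.headD []).length 0)
  rw [List.foldl_map] at hz
  simp only [pvIns]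
  rw [hz]
  rfl

theorem patterns_equiv (coeffs : List (List Int)) : patterns coeffs = patterns_alt coeffs := by
  have hB : patterns_alt coeffs = (List.range (coeffs.length + 1)).foldl (pvStep coeffs) [] := by
    simp only [patterns_alt]
    rw [B_loop coeffs coeffs.length]
  rw [A_eq_steps, hB]

-- ===== VERDICT (by name: the statement is the Claim_ definition above) =====
theorem patterns_spec : Claim_equal_patterns := by
  intro coeffs _ _
  unfold Spec_patterns
  exact patterns_equiv coeffs
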